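-- pv_equiv track=rewrite | github.com/pypi-data/pypi-mirror-402 | packages/darkzloop/darkzloop-0.8.3.tar.gz/darkzloop-0.8.3/darkzloop/core/context.py | extract_relevant_spec_sections
-- ===== SOURCE A (Python) =====
-- from typing import List, Optional, Dict, Any
--
-- def extract_relevant_spec_sections(full_spec: str, task_sections: List[str]) -> str:
--     """
--     Extract only the relevant sections from the spec.
--     Reduces tokens by not including the entire spec.
--     """
--     # Simple implementation - look for section headers
--     lines = full_spec.split('\n')
--     relevant_lines = []
--     in_relevant_section = False
--
--     for line in lines:
--         # Check if this is a header for a relevant section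
--         if line.startswith('#'):
--             in_relevant_section = any(
--                 section.lower() in line.lower()
--                 for section in task_sections
--             )
--
--         if in_relevant_section:
--             relevant_lines.append(line)
--
--     return '\n'.join(relevant_lines) if relevant_lines else full_spec[:1000]
-- ===== SOURCE B (Python) =====
-- from typing import List
--
-- def extract_relevant_spec_sections(full_spec: str, task_sections: List[str]) -> str:
--     """Group the lines into header-delimited sections, flag each section once,
--     then concatenate the flagged sections."""
--     lines = full_spec.split('\n')
--
--     def matches(header: str) -> bool:
--         return any(s.lower() in header.lower() for s in task_sections)
--
--     groups = []
--     cur_flag, cur_lines = False, []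
--     for line in lines:
--         if line.startswith('#'):
--             groups.append((cur_flag, cur_lines))
--             cur_flag, cur_lines = matches(line), []
--         cur_lines.append(line)
--     groups.append((cur_flag, cur_lines))
--
--     collected = [l for flag, sec in groups if flag for l in sec]
--     return '\n'.join(collected) if collected else full_spec[:1000]
-- ===== Notes on version B (the rewrite author's own statement) =====
-- stated objective: alternative
-- what changed: Replaced the persistent in-section flag threaded through a single line scan by an explicit partition of the lines into header-delimited groups, each flagged once, with the flagged groups' lines concatenated afterwards.
import Mathlib
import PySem

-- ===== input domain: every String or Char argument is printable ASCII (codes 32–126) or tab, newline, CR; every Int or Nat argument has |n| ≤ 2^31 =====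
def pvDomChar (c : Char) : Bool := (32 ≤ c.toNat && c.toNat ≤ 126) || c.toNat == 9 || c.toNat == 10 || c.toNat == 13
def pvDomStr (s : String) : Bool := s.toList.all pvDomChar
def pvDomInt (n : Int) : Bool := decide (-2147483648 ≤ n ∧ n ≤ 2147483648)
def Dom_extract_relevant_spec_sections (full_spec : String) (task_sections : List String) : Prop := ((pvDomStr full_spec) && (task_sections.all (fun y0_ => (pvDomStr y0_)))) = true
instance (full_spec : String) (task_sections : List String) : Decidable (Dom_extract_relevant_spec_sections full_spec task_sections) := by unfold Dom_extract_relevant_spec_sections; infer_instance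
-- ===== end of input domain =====

-- ===== PORT A =====
-- shared helper: `any(section.lower() in line.lower() for section in task_sections)`
def pvHeaderMatches (task_sections : List String) (line : String) : Bool :=
  task_sections.any (fun section_ => PySem.Str.isIn (PySem.Str.lower section_) (PySem.Str.lower line))

-- A's loop body: update the persistent flag, append the line if the flag is set
def pvStepA (task_sections : List String) (st : List String × Bool) (line : String) :
    List String × Bool :=
  let in_relevant_section :=
    if PySem.Str.startswith line "#" then pvHeaderMatches task_sections line else st.2
  if in_relevant_section then (st.1 ++ [line], in_relevant_section)
  else (st.1, in_relevant_section)

def extract_relevant_spec_sections (full_spec : String) (task_sections : List String) : String :=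
  let lines := (PySem.Str.split? full_spec "\n").getD []  -- sep "\n" ≠ "": split? is always some
  let st := lines.foldl (pvStepA task_sections) ([], false)
  if st.1 ≠ [] then PySem.Str.join "\n" st.1
  else PySem.Str.slice full_spec none (some 1000)

-- ===== PORT B =====
-- B's loop body: on a header close the current group and start a freshly-flagged one,
-- then append the line to the current group
def pvStepB (task_sections : List String)
    (st : List (Bool × List String) × Bool × List String) (line : String) :
    List (Bool × List String) × Bool × List String :=
  let st :=
    if PySem.Str.startswith line "#" then
      (st.1 ++ [(st.2.1, st.2.2)], pvHeaderMatches task_sections line, ([] : List String))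
    else st
  (st.1, st.2.1, st.2.2 ++ [line])

def extract_relevant_spec_sections_alt (full_spec : String) (task_sections : List String) : String :=
  let lines := (PySem.Str.split? full_spec "\n").getD []  -- sep "\n" ≠ "": split? is always some
  let st := lines.foldl (pvStepB task_sections) ([], false, [])
  let groups := st.1 ++ [(st.2.1, st.2.2)]
  let collected := groups.foldl (fun acc g => if g.1 then acc ++ g.2 else acc) []
  if collected ≠ [] then PySem.Str.join "\n" collected
  else PySem.Str.slice full_spec none (some 1000)

-- ===== PRECONDITION & SPEC =====
def Spec_extract_relevant_spec_sections (full_spec : String) (task_sections : List String) (out : String) : Prop := out = extract_relevant_spec_sections_alt full_spec task_sections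
instance (full_spec : String) (task_sections : List String) (out : String) : Decidable (Spec_extract_relevant_spec_sections full_spec task_sections out) := by unfold Spec_extract_relevant_spec_sections; infer_instance

-- ===== CLAIM (what is proved, stated in full; the proofs are below) =====
def Claim_equal_extract_relevant_spec_sections : Prop := ∀ (full_spec : String) (task_sections : List String), Dom_extract_relevant_spec_sections full_spec task_sections → Spec_extract_relevant_spec_sections full_spec task_sections (extract_relevant_spec_sections full_spec task_sections)

-- ===== LEMMAS AND PROOFS =====

-- the lines of the flagged groups, in order
def pvCollect (gs : List (Bool × List String)) : List String :=
  gs.flatMap (fun g => if g.1 then g.2 else [])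

theorem pvCollect_foldl (gs : List (Bool × List String)) (acc : List String) :
    gs.foldl (fun acc g => if g.1 then acc ++ g.2 else acc) acc = acc ++ pvCollect gs := by
  induction gs generalizing acc with
  | nil => simp [pvCollect]
  | cons g t ih => cases hg : g.1 <;> simp [pvCollect, hg, ih]

theorem pvCollect_append (gs hs : List (Bool × List String)) :
    pvCollect (gs ++ hs) = pvCollect gs ++ pvCollect hs := by
  simp [pvCollect]

-- loop invariant: B's state (groups, flag, current group) determines A's state (lines, flag)
theorem pv_inv (ts : List String) (lines : List String) (rel : List String) (flag : Bool)
    (gs : List (Bool × List String)) (cur : List String)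
    (h : rel = pvCollect gs ++ (if flag then cur else [])) :
    lines.foldl (pvStepA ts) (rel, flag) =
      (let st := lines.foldl (pvStepB ts) (gs, flag, cur)
       (pvCollect st.1 ++ (if st.2.1 then st.2.2 else []), st.2.1)) := by
  induction lines generalizing rel flag gs cur with
  | nil => simpa using h
  | cons line rest ih =>
    simp only [List.foldl_cons]
    by_cases hh : PySem.Str.startswith line "#"
    · by_cases hm : pvHeaderMatches ts line
      · simp only [pvStepA, pvStepB, hh, hm, if_pos]
        exact ih _ _ _ _ (by simp [h, pvCollect_append, pvCollect])
      · simp only [pvStepA, pvStepB, hh, hm, if_pos, Bool.false_eq_true, if_false]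
        exact ih _ _ _ _ (by simp [h, pvCollect_append, pvCollect])
    · cases hf : flag
      · simp only [pvStepA, pvStepB, hh, Bool.false_eq_true, if_false]
        exact ih _ _ _ _ (by simp [h, hf])
      · simp only [pvStepA, pvStepB, hh, Bool.false_eq_true, if_false]
        exact ih _ _ _ _ (by simp [h, hf])

-- ===== VERDICT (by name: the statement is the Claim_ definition above) =====
theorem extract_relevant_spec_sections_spec : Claim_equal_extract_relevant_spec_sections := by
  intro full_spec ts _
  unfold Spec_extract_relevant_spec_sections
  show extract_relevant_spec_sections full_spec ts = extract_relevant_spec_sections_alt full_spec ts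
  simp only [extract_relevant_spec_sections, extract_relevant_spec_sections_alt]
  rw [pv_inv ts _ [] false [] [] (by simp [pvCollect])]
  simp only [pvCollect_foldl, pvCollect_append, List.nil_append]
  generalize List.foldl (pvStepB ts) ([], false, []) ((PySem.Str.split? full_spec "\n").getD []) = st
  obtain ⟨gs, flag, cur⟩ := st
  cases flag <;>
    simp only [pvCollect, List.flatMap_cons, List.flatMap_nil, List.append_nil, reduceIte]
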